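-- pv_equiv track=rewrite | github.com/Valeogamer/Learn-and-Tasks | 6.Parallel_and_Distributed_Computing/Labs/1.Threads/bitonic_find.py | count_bitonic_subsequences
-- ===== SOURCE A (Python) =====
-- def count_bitonic_subsequences(arr, start, end):
--     """
--     Подсчет битонических подпоследовательностей в части массива arr[start:end]
--     """
--     up = down = False
--     cnt = 0
--
--     for i in range(start, end - 1):
--         if arr[i + 1] > arr[i]:
--             up = True
--             if down:
--                 cnt += 1
--                 down = False
--         elif arr[i + 1] < arr[i]:
--             down = True
--             if up:
--                 cnt += 1
--                 up = False
--
--     return cnt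
-- ===== SOURCE B (Python) =====
-- def count_bitonic_subsequences(arr, start, end):
--     signs = []
--     for i in range(start, end - 1):
--         if arr[i + 1] > arr[i]:
--             signs.append(1)
--         elif arr[i + 1] < arr[i]:
--             signs.append(-1)
--     return sum(1 for x, y in zip(signs, signs[1:]) if x != y)
-- ===== Notes on version B (the rewrite author's own statement) =====
-- stated objective: alternative
-- what changed: Replaces A's two-boolean flag machine (up/down with in-loop resets) by first materialising the list of strict direction signs (+1/-1, equal pairs omitted) and then counting adjacent sign changes over zip(signs, signs[1:]).
import Mathlib
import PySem

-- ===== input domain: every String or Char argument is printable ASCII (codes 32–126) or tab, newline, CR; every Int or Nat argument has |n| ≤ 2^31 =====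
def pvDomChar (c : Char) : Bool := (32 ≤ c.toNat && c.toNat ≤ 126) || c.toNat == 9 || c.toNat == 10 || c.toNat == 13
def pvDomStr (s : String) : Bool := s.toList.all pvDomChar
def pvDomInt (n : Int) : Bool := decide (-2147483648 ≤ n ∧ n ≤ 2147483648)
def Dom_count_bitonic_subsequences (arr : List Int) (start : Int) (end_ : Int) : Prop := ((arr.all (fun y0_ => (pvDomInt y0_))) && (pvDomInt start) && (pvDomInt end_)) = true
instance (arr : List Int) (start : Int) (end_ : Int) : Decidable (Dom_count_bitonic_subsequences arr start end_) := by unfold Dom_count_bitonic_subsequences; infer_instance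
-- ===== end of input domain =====

-- B builds the explicit list of strict direction signs and counts adjacent sign changes,
-- replacing A's up/down flag machine (alternative decomposition, same cost).

-- ===== PORT A =====
-- state = (up, down, cnt); arr[i] ported as pyGetD (in range on all Pre_ inputs)
def pvAStep (arr : List Int) (st : Bool × Bool × Int) (i : Int) : Bool × Bool × Int :=
  let nxt := PySem.List.pyGetD arr (i + 1) 0
  let cur := PySem.List.pyGetD arr i 0
  if nxt > cur then
    (true, false, st.2.2 + (if st.2.1 then 1 else 0))
  else if nxt < cur then
    (false, true, st.2.2 + (if st.1 then 1 else 0))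
  else st

def count_bitonic_subsequences (arr : List Int) (start : Int) (end_ : Int) : Int :=
  ((PySem.List.pyRange start (end_ - 1) 1).foldl (pvAStep arr) (false, false, 0)).2.2

-- ===== PORT B =====
-- signs-building loop (append +1 / -1, skip equal pairs)
def pvBStep (arr : List Int) (acc : List Int) (i : Int) : List Int :=
  let nxt := PySem.List.pyGetD arr (i + 1) 0
  let cur := PySem.List.pyGetD arr i 0
  if nxt > cur then acc ++ [1]
  else if nxt < cur then acc ++ [-1]
  else acc

-- sum(1 for x, y in zip(signs, signs[1:]) if x != y): recursion over adjacent pairs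
def pvCountChanges : List Int → Int
  | x :: y :: t => (if x ≠ y then 1 else 0) + pvCountChanges (y :: t)
  | _ => 0

def count_bitonic_subsequences_alt (arr : List Int) (start : Int) (end_ : Int) : Int :=
  pvCountChanges ((PySem.List.pyRange start (end_ - 1) 1).foldl (pvBStep arr) [])

-- ===== PRECONDITION & SPEC =====
-- Pre_ excludes exactly the inputs on which A raises IndexError: a nonempty index range
-- reaching outside Python's valid index window [-len, len).
def Pre_count_bitonic_subsequences (arr : List Int) (start : Int) (end_ : Int) : Prop :=
  end_ - 1 ≤ start ∨ (-(arr.length : Int) ≤ start ∧ end_ ≤ (arr.length : Int))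
instance (arr : List Int) (start : Int) (end_ : Int) : Decidable (Pre_count_bitonic_subsequences arr start end_) := by unfold Pre_count_bitonic_subsequences; infer_instance

def pvWitness_count_bitonic_subsequences : List Int × Int × Int := ([1, 3, 2, 4, 1], 0, 5)

def Spec_count_bitonic_subsequences (arr : List Int) (start : Int) (end_ : Int) (out : Int) : Prop := out = count_bitonic_subsequences_alt arr start end_
instance (arr : List Int) (start : Int) (end_ : Int) (out : Int) : Decidable (Spec_count_bitonic_subsequences arr start end_ out) := by unfold Spec_count_bitonic_subsequences; infer_instance

-- ===== CLAIM (what is proved, stated in full; the proofs are below) =====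
def Claim_equal_count_bitonic_subsequences : Prop := ∀ (arr : List Int) (start : Int) (end_ : Int), Dom_count_bitonic_subsequences arr start end_ → Pre_count_bitonic_subsequences arr start end_ → Spec_count_bitonic_subsequences arr start end_ (count_bitonic_subsequences arr start end_)

-- ===== LEMMAS AND PROOFS =====

-- the sign (if any) the loop body emits at index i
def pvSign (arr : List Int) (i : Int) : Option Int :=
  let nxt := PySem.List.pyGetD arr (i + 1) 0
  let cur := PySem.List.pyGetD arr i 0
  if nxt > cur then some 1 else if nxt < cur then some (-1) else none

-- A's (up, down) flags as a function of the last emitted sign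
def pvUD : Option Int → Bool × Bool
  | none => (false, false)
  | some s => if s > 0 then (true, false) else (false, true)

-- adjacent-change count of a sign list, seeded with the previous sign
def pvChg : Option Int → List Int → Int
  | _, [] => 0
  | none, x :: xs => pvChg (some x) xs
  | some p, x :: xs => (if p ≠ x then 1 else 0) + pvChg (some x) xs

lemma pvSign_pos (arr : List Int) (i : Int)
    (h : PySem.List.pyGetD arr (i + 1) 0 > PySem.List.pyGetD arr i 0) :
    pvSign arr i = some 1 := by simp [pvSign, h]

lemma pvSign_negc (arr : List Int) (i : Int)
    (h1 : ¬ PySem.List.pyGetD arr (i + 1) 0 > PySem.List.pyGetD arr i 0)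
    (h2 : PySem.List.pyGetD arr (i + 1) 0 < PySem.List.pyGetD arr i 0) :
    pvSign arr i = some (-1) := by simp [pvSign, h1, h2]

lemma pvSign_none (arr : List Int) (i : Int)
    (h1 : ¬ PySem.List.pyGetD arr (i + 1) 0 > PySem.List.pyGetD arr i 0)
    (h2 : ¬ PySem.List.pyGetD arr (i + 1) 0 < PySem.List.pyGetD arr i 0) :
    pvSign arr i = none := by simp [pvSign, h1, h2]

lemma pvB_signs (arr : List Int) (l : List Int) (acc : List Int) :
    l.foldl (pvBStep arr) acc = acc ++ l.filterMap (pvSign arr) := by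
  induction l generalizing acc with
  | nil => simp
  | cons i t ih =>
    rw [List.foldl_cons, List.filterMap_cons]
    by_cases h1 : PySem.List.pyGetD arr (i + 1) 0 > PySem.List.pyGetD arr i 0
    · rw [pvSign_pos arr i h1, show pvBStep arr acc i = acc ++ [1] from by simp [pvBStep, h1],
        ih]
      simp
    · by_cases h2 : PySem.List.pyGetD arr (i + 1) 0 < PySem.List.pyGetD arr i 0
      · rw [pvSign_negc arr i h1 h2,
          show pvBStep arr acc i = acc ++ [-1] from by simp [pvBStep, h1, h2], ih]
        simp
      · rw [pvSign_none arr i h1 h2,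
          show pvBStep arr acc i = acc from by simp [pvBStep, h1, h2], ih]

lemma pvCountChanges_eq_chg (x : Int) (xs : List Int) :
    pvCountChanges (x :: xs) = pvChg (some x) xs := by
  induction xs generalizing x with
  | nil => simp [pvCountChanges, pvChg]
  | cons y t ih => simp [pvCountChanges, pvChg, ih]

lemma pvA_loop (arr : List Int) (l : List Int) (o : Option Int) (cnt : Int)
    (ho : o = none ∨ o = some 1 ∨ o = some (-1)) :
    (l.foldl (pvAStep arr) ((pvUD o).1, (pvUD o).2, cnt)).2.2
      = cnt + pvChg o (l.filterMap (pvSign arr)) := by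
  induction l generalizing o cnt with
  | nil => cases o <;> simp [pvChg]
  | cons i t ih =>
    rw [List.foldl_cons, List.filterMap_cons]
    by_cases h1 : PySem.List.pyGetD arr (i + 1) 0 > PySem.List.pyGetD arr i 0
    · rw [pvSign_pos arr i h1,
        show pvAStep arr ((pvUD o).1, (pvUD o).2, cnt) i
            = (true, false, cnt + (if (pvUD o).2 then 1 else 0)) from by simp [pvAStep, h1]]
      have h := ih (some 1) (cnt + (if (pvUD o).2 then 1 else 0)) (Or.inr (Or.inl rfl))
      rw [show pvUD (some 1) = (true, false) from by norm_num [pvUD]] at h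
      rw [h]
      rcases ho with rfl | rfl | rfl <;> norm_num [pvUD, pvChg] <;> ring
    · by_cases h2 : PySem.List.pyGetD arr (i + 1) 0 < PySem.List.pyGetD arr i 0
      · rw [pvSign_negc arr i h1 h2,
          show pvAStep arr ((pvUD o).1, (pvUD o).2, cnt) i
              = (false, true, cnt + (if (pvUD o).1 then 1 else 0)) from by simp [pvAStep, h1, h2]]
        have h := ih (some (-1)) (cnt + (if (pvUD o).1 then 1 else 0)) (Or.inr (Or.inr rfl))
        rw [show pvUD (some (-1)) = (false, true) from by norm_num [pvUD]] at h
        rw [h]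
        rcases ho with rfl | rfl | rfl <;> norm_num [pvUD, pvChg] <;> ring
      · rw [pvSign_none arr i h1 h2,
          show pvAStep arr ((pvUD o).1, (pvUD o).2, cnt) i = ((pvUD o).1, (pvUD o).2, cnt) from
            by simp [pvAStep, h1, h2]]
        rcases ho with rfl | rfl | rfl <;> exact ih _ cnt (by simp)

lemma pvChg_none_eq_count (s : List Int) : pvChg none s = pvCountChanges s := by
  cases s with
  | nil => simp [pvChg, pvCountChanges]
  | cons x xs => rw [pvChg, pvCountChanges_eq_chg]

-- ===== VERDICT (by name: the statement is the Claim_ definition above) =====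
theorem count_bitonic_subsequences_spec : Claim_equal_count_bitonic_subsequences := by
  intro arr start end_ _ _
  unfold Spec_count_bitonic_subsequences count_bitonic_subsequences count_bitonic_subsequences_alt
  rw [pvB_signs arr _ [], List.nil_append, ← pvChg_none_eq_count]
  have h := pvA_loop arr (PySem.List.pyRange start (end_ - 1) 1) none 0 (Or.inl rfl)
  simpa [pvUD] using h
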